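-- pv_equiv track=rewrite | github.com/MarkWanis/Nonogram-Bot | main.py | lineToData
-- ===== SOURCE A (Python) =====
-- def lineToData(line):
--
--   data = [0]
--
--   for cell in line:
--     if cell == 'O':
--       data[-1] += 1
--
--     elif cell == 'X' and data[-1] != 0:
--       data.append(0)
--
--   if data[-1] == 0 and len(data) > 1:
--     del data[-1]
--
--   return data
-- ===== SOURCE B (Python) =====
-- def lineToData(line):
--   segments = []
--   seg = []
--   for cell in line:
--     if cell == 'X':
--       segments.append(seg)
--       seg = []
--     else:
--       seg.append(cell)
--   segments.append(seg)
--
--   counts = [s.count('O') for s in segments]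
--   result = [c for c in counts if c != 0]
--   return result or [0]
-- ===== Notes on version B (the rewrite author's own statement) =====
-- stated objective: alternative
-- what changed: B first builds the segmentation of the line on 'X' cells, then counts 'O' cells per segment and keeps the nonzero counts (falling back to [0]), instead of A's incremental last-element accumulation on a growing list.
import Mathlib
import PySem

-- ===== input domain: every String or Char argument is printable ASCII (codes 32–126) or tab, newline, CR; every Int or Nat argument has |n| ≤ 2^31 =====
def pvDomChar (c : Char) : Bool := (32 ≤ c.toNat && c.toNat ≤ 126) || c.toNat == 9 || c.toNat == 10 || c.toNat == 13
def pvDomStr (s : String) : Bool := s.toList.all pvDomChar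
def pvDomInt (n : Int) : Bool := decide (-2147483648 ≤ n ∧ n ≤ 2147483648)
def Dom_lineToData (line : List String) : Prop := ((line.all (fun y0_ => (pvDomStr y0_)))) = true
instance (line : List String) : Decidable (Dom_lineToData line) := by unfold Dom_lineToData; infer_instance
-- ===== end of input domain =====

-- B builds the 'X'-segmentation first and counts 'O's per segment (keeping nonzero
-- counts, falling back to [0]); A keeps a running last-element accumulator.  Same
-- values everywhere; choice is structural (alternative), not a speed claim.

-- ===== PORT A =====
def lineToData (line : List String) : List Int :=
  let data := line.foldl (fun data cell =>
    if cell = "O" then data.dropLast ++ [data.getLastD 0 + 1]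
    else if cell = "X" ∧ data.getLastD 0 ≠ 0 then data ++ [0]
    else data) ([0] : List Int)
  if data.getLastD 0 = 0 ∧ data.length > 1 then data.dropLast else data

-- ===== PORT B =====
-- the segmentation loop of Source B, written as the obvious structural recursion
def pvSplitX : List String → List (List String)
  | [] => [[]]
  | c :: rest =>
    if c = "X" then [] :: pvSplitX rest
    else
      match pvSplitX rest with
      | s :: ss => (c :: s) :: ss
      | [] => [[c]]

def lineToData_alt (line : List String) : List Int :=
  let counts := (pvSplitX line).map (fun s => (s.count "O" : Int))
  let result := counts.filter (fun c => c != 0)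
  if result = [] then [0] else result

-- ===== PRECONDITION & SPEC =====
def Spec_lineToData (line : List String) (out : List Int) : Prop := out = lineToData_alt line
instance (line : List String) (out : List Int) : Decidable (Spec_lineToData line out) := by unfold Spec_lineToData; infer_instance

-- ===== CLAIM (what is proved, stated in full; the proofs are below) =====
def Claim_equal_lineToData : Prop := ∀ (line : List String), Dom_lineToData line → Spec_lineToData line (lineToData line)

-- ===== LEMMAS AND PROOFS =====

/-- What A's fold does on the suffix `rest`, starting with current run count `cur`. -/
def pvBody (cur : Int) : List String → List Int
  | [] => [cur]
  | c :: rest =>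
    if c = "O" then pvBody (cur + 1) rest
    else if c = "X" ∧ cur ≠ 0 then cur :: pvBody 0 rest
    else pvBody cur rest

/-- Add `cur` to the head of a list (empty list treated as `[cur]`). -/
def pvHeadAdd (cur : Int) : List Int → List Int
  | [] => [cur]
  | c :: t => (cur + c) :: t

lemma pvSplitX_ne_nil (rest : List String) : pvSplitX rest ≠ [] := by
  induction rest with
  | nil => simp [pvSplitX]
  | cons c r ih =>
    simp only [pvSplitX]
    split
    · simp
    · cases h : pvSplitX r with
      | nil => exact absurd h ih
      | cons s ss => simp

lemma pvFold_eq_body (rest : List String) :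
    ∀ (front : List Int) (cur : Int),
    rest.foldl (fun data cell =>
      if cell = "O" then data.dropLast ++ [data.getLastD 0 + 1]
      else if cell = "X" ∧ data.getLastD 0 ≠ 0 then data ++ [0]
      else data) (front ++ [cur]) = front ++ pvBody cur rest := by
  induction rest with
  | nil => intro front cur; simp [pvBody]
  | cons c r ih =>
    intro front cur
    simp only [List.foldl_cons, pvBody, List.getLastD_concat, List.dropLast_concat]
    by_cases hO : c = "O"
    · rw [if_pos hO, if_pos hO]
      exact ih front (cur + 1)
    · rw [if_neg hO, if_neg hO]
      by_cases hX : c = "X" ∧ cur ≠ 0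
      · rw [if_pos hX, if_pos hX, ih (front ++ [cur]) 0]
        simp
      · rw [if_neg hX, if_neg hX]
        exact ih front cur

/-- Head-adjusted segment counts for the suffix. -/
def pvTcs (cur : Int) (rest : List String) : List Int :=
  pvHeadAdd cur ((pvSplitX rest).map (fun s => (s.count "O" : Int)))

lemma pvTcs_ne_nil (cur : Int) (rest : List String) : pvTcs cur rest ≠ [] := by
  unfold pvTcs
  cases (pvSplitX rest).map (fun s => (s.count "O" : Int)) <;> simp [pvHeadAdd]

lemma pvTcs_zero (rest : List String) :
    pvTcs 0 rest = (pvSplitX rest).map (fun s => (s.count "O" : Int)) := by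
  unfold pvTcs
  cases h : (pvSplitX rest).map (fun s => (s.count "O" : Int)) with
  | nil => exact absurd (List.map_eq_nil_iff.mp h) (pvSplitX_ne_nil rest)
  | cons a t => simp [pvHeadAdd]

lemma pvTcs_cons_O (cur : Int) (r : List String) :
    pvTcs cur ("O" :: r) = pvTcs (cur + 1) r := by
  unfold pvTcs
  simp only [pvSplitX]
  rw [if_neg (by decide : ¬ ("O" : String) = "X")]
  cases h : pvSplitX r with
  | nil => exact absurd h (pvSplitX_ne_nil r)
  | cons s ss =>
    simp [pvHeadAdd]
    ring

lemma pvTcs_cons_X (cur : Int) (r : List String) :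
    pvTcs cur ("X" :: r) = cur :: pvTcs 0 r := by
  rw [pvTcs_zero]
  unfold pvTcs
  simp [pvSplitX, pvHeadAdd]

lemma pvTcs_cons_other (cur : Int) (c : String) (r : List String)
    (hO : c ≠ "O") (hX : c ≠ "X") :
    pvTcs cur (c :: r) = pvTcs cur r := by
  unfold pvTcs
  simp only [pvSplitX]
  rw [if_neg hX]
  cases h : pvSplitX r with
  | nil => exact absurd h (pvSplitX_ne_nil r)
  | cons s ss =>
    simp [pvHeadAdd, hO]

lemma pvBody_eq (rest : List String) : ∀ (cur : Int),
    pvBody cur rest =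
      (pvTcs cur rest).dropLast.filter (fun c => c != 0) ++ [(pvTcs cur rest).getLastD 0] := by
  induction rest with
  | nil => intro cur; simp [pvBody, pvTcs, pvHeadAdd, pvSplitX]
  | cons c r ih =>
    intro cur
    by_cases hO : c = "O"
    · subst hO
      rw [pvTcs_cons_O]
      have e : pvBody cur ("O" :: r) = pvBody (cur + 1) r := by simp [pvBody]
      rw [e]
      exact ih (cur + 1)
    · by_cases hX : c = "X"
      · subst hX
        rw [pvTcs_cons_X]
        have hne : pvTcs 0 r ≠ [] := pvTcs_ne_nil 0 r
        obtain ⟨a, t, h⟩ := List.exists_cons_of_ne_nil hne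
        by_cases hc : cur = 0
        · subst hc
          have e : pvBody 0 ("X" :: r) = pvBody 0 r := by simp [pvBody]
          rw [e, ih 0, h]
          simp
        · have e : pvBody cur ("X" :: r) = cur :: pvBody 0 r := by simp [pvBody, hc]
          rw [e, ih 0, h]
          simp [hc]
      · rw [pvTcs_cons_other cur c r hO hX]
        have e : pvBody cur (c :: r) = pvBody cur r := by simp [pvBody, hO, hX]
        rw [e]
        exact ih cur

lemma pvDropLast_concat_getLastD {l : List Int} (h : l ≠ []) :
    l.dropLast ++ [l.getLastD 0] = l := by
  induction l with
  | nil => exact absurd rfl h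
  | cons a t ih =>
    cases t with
    | nil => simp
    | cons b u => simpa using ih (by simp)

lemma pvFilter_decomp (T : List Int) (h : T ≠ []) :
    T.filter (fun c => c != 0) =
      T.dropLast.filter (fun c => c != 0) ++
        (if T.getLastD 0 = 0 then [] else [T.getLastD 0]) := by
  conv_lhs => rw [← pvDropLast_concat_getLastD h]
  rw [List.filter_append]
  simp only [List.getLastD_eq_getLast?]
  by_cases hx : T.getLast?.getD 0 = 0
  · simp [hx]
  · simp [hx]

lemma pvIfLemma (F : List Int) (L : Int) :
    (if (F ++ [L]).getLastD 0 = 0 ∧ (F ++ [L]).length > 1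
     then (F ++ [L]).dropLast else F ++ [L]) =
    (if (F ++ (if L = 0 then [] else [L])) = [] then [0]
     else F ++ (if L = 0 then [] else [L])) := by
  rw [List.getLastD_concat]
  by_cases hL0 : L = 0
  · subst hL0
    rw [if_pos rfl]
    cases F with
    | nil => simp
    | cons a t =>
      rw [if_pos ⟨rfl, by simp⟩, if_neg (by simp), List.append_nil,
          List.dropLast_concat]
  · rw [if_neg hL0, if_neg (fun hh => hL0 hh.1), if_neg (by simp)]

-- ===== VERDICT (by name: the statement is the Claim_ definition above) =====
theorem lineToData_spec : Claim_equal_lineToData := by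
  intro line _
  show lineToData line = lineToData_alt line
  have hfold := pvFold_eq_body line [] 0
  simp only [List.nil_append] at hfold
  simp only [lineToData, lineToData_alt]
  rw [hfold, pvBody_eq line 0, ← pvTcs_zero, pvIfLemma,
      ← pvFilter_decomp _ (pvTcs_ne_nil 0 line)]
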